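-- pv_equiv track=rewrite | github.com/bryonymoody/PolyChron | src/polychron/mcmc.py | phase_limits
-- ===== SOURCE A (Python) =====
-- def phase_limits(phases, POST_PHASE):
--     "Provides phase limits for a phase"
--     upper = []
--     lower = []
--     i_phase = 0
--     for a_val in enumerate(POST_PHASE):
--         upper.append(phases[i_phase])
--         i_phase = i_phase + 1
--         lower.append(phases[i_phase])
--         if a_val[1] != "abutting":
--             i_phase = i_phase + 1
--     phase_bounds = [list(x) for x in zip(lower, upper)]
--     return phase_bounds
-- ===== SOURCE B (Python) =====
-- def phase_limits(phases, POST_PHASE):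
--     "Provides phase limits for a phase"
--     if not POST_PHASE:
--         return []
--     upper = phases[0]
--     lower = phases[1]
--     rest = phases[1:] if POST_PHASE[0] == "abutting" else phases[2:]
--     return [[lower, upper]] + phase_limits(rest, POST_PHASE[1:])
-- ===== Notes on version B (the rewrite author's own statement) =====
-- stated objective: alternative
-- what changed: B is a recursive list-consumer: it reads the head pair of `phases`, slices off one or two elements depending on the phase type, and recurses on the suffixes, with no index counter, accumulators or zip pass.
import Mathlib
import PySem

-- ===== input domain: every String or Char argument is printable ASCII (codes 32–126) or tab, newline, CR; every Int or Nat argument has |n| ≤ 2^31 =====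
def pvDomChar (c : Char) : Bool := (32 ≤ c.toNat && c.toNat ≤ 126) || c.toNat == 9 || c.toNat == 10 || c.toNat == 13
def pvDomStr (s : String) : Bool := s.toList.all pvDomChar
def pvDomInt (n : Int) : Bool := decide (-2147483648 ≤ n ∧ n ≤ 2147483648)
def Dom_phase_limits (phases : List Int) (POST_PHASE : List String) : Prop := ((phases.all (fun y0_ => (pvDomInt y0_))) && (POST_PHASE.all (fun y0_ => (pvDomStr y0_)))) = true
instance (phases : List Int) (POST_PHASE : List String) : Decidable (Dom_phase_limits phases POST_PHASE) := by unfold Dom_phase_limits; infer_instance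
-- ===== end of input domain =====

-- B replaces A's index-counter loop with two appended accumulators plus zip by a
-- recursive list-consumer that slices `phases` as it goes; objective: alternative.


-- ===== PORT A =====
-- indices i_phase are nonnegative and, on Pre_, in range; getD 0 is exact there
def phase_limits (phases : List Int) (POST_PHASE : List String) : List (List Int) :=
  let st := POST_PHASE.foldl
    (fun (st : List Int × List Int × Nat) a_val =>
      let upper := st.1 ++ [phases.getD st.2.2 0]
      let i1 := st.2.2 + 1
      let lower := st.2.1 ++ [phases.getD i1 0]
      let i2 := if a_val != "abutting" then i1 + 1 else i1
      (upper, lower, i2))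
    ([], [], 0)
  (List.zip st.2.1 st.1).map (fun x => [x.1, x.2])

-- ===== PORT B =====
-- phases[0]/phases[1] are in range on Pre_; getD 0 is exact there. phases[1:]/[2:] = drop.
def phase_limits_alt (phases : List Int) (POST_PHASE : List String) : List (List Int) :=
  match POST_PHASE with
  | [] => []
  | v :: rest_post =>
      let upper := phases.getD 0 0
      let lower := phases.getD 1 0
      let rest := if v == "abutting" then phases.drop 1 else phases.drop 2
      [lower, upper] :: phase_limits_alt rest rest_post

-- ===== PRECONDITION & SPEC =====
-- Pre_ excludes exactly the inputs where Python A raises IndexError: phases must be long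
-- enough for the final index the loop reads (length POST_PHASE plus one extra step for
-- each non-"abutting" entry before the last).
def Pre_phase_limits (phases : List Int) (POST_PHASE : List String) : Prop :=
  POST_PHASE = [] ∨
    POST_PHASE.length + (POST_PHASE.dropLast.countP (fun s => s ≠ "abutting")) < phases.length
instance (phases : List Int) (POST_PHASE : List String) : Decidable (Pre_phase_limits phases POST_PHASE) := by unfold Pre_phase_limits; infer_instance
def pvWitness_phase_limits : List Int × List String := ([1, 2, 3, 4, 5], ["abutting", "overlap"])

def Spec_phase_limits (phases : List Int) (POST_PHASE : List String) (out : List (List Int)) : Prop := out = phase_limits_alt phases POST_PHASE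
instance (phases : List Int) (POST_PHASE : List String) (out : List (List Int)) : Decidable (Spec_phase_limits phases POST_PHASE out) := by unfold Spec_phase_limits; infer_instance

-- ===== CLAIM (what is proved, stated in full; the proofs are below) =====
def Claim_equal_phase_limits : Prop := ∀ (phases : List Int) (POST_PHASE : List String), Dom_phase_limits phases POST_PHASE → Pre_phase_limits phases POST_PHASE → Spec_phase_limits phases POST_PHASE (phase_limits phases POST_PHASE)

-- ===== LEMMAS AND PROOFS =====

-- proof-only device: the sequence of offsets A's counter visits, and its final value
def pvOffs (ps : List String) (i : Nat) : List Nat :=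
  match ps with
  | [] => []
  | v :: rest => i :: pvOffs rest (if v == "abutting" then i + 1 else i + 2)

def pvEnd (ps : List String) (i : Nat) : Nat :=
  match ps with
  | [] => i
  | v :: rest => pvEnd rest (if v == "abutting" then i + 1 else i + 2)

-- A's fold, started from mapped accumulators, lands on the mapped offset table.
theorem pv_foldA (phases : List Int) :
    ∀ (ps : List String) (os : List Nat) (i : Nat),
      ps.foldl
        (fun (st : List Int × List Int × Nat) a_val =>
          let upper := st.1 ++ [phases.getD st.2.2 0]
          let i1 := st.2.2 + 1
          let lower := st.2.1 ++ [phases.getD i1 0]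
          let i2 := if a_val != "abutting" then i1 + 1 else i1
          (upper, lower, i2))
        (os.map (fun o => phases.getD o 0), os.map (fun o => phases.getD (o + 1) 0), i)
      = ((os ++ pvOffs ps i).map (fun o => phases.getD o 0),
         (os ++ pvOffs ps i).map (fun o => phases.getD (o + 1) 0),
         pvEnd ps i) := by
  intro ps
  induction ps with
  | nil => intro os i; simp [pvOffs, pvEnd]
  | cons a t ih =>
      intro os i
      simp only [List.foldl_cons]
      have h1 : (os.map (fun o => phases.getD o 0)) ++ [phases.getD i 0]
          = (os ++ [i]).map (fun o => phases.getD o 0) := by simp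
      have h2 : (os.map (fun o => phases.getD (o + 1) 0)) ++ [phases.getD (i + 1) 0]
          = (os ++ [i]).map (fun o => phases.getD (o + 1) 0) := by simp
      by_cases hab : a = "abutting"
      · subst hab
        simpa [pvOffs, pvEnd, h1, h2] using ih (os ++ [i]) (i + 1)
      · have hne : (a != "abutting") = true := by simp [hab]
        have heq : (a == "abutting") = false := by simp [hab]
        simpa [pvOffs, pvEnd, hne, heq, h1, h2] using ih (os ++ [i]) (i + 2)

-- B on a dropped suffix gathers exactly the offset table.
theorem pv_altB (phases : List Int) :
    ∀ (ps : List String) (i : Nat),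
      phase_limits_alt (phases.drop i) ps
      = (pvOffs ps i).map (fun o => [phases.getD (o + 1) 0, phases.getD o 0]) := by
  intro ps
  induction ps with
  | nil => intro i; simp [phase_limits_alt, pvOffs]
  | cons a t ih =>
      intro i
      by_cases hab : a = "abutting"
      · subst hab
        have hd : (phases.drop i).drop 1 = phases.drop (i + 1) := by
          rw [List.drop_drop]
        simp [phase_limits_alt, pvOffs, hd, ih (i + 1)]
      · have heq : (a == "abutting") = false := by simp [hab]
        have hd : (phases.drop i).drop 2 = phases.drop (i + 2) := by
          rw [List.drop_drop]
        simp [phase_limits_alt, pvOffs, heq, hd, ih (i + 2)]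

-- ===== VERDICT (by name: the statement is the Claim_ definition above) =====
theorem phase_limits_spec : Claim_equal_phase_limits := by
  intro phases POST_PHASE _ _
  unfold Spec_phase_limits phase_limits
  have hA := pv_foldA phases POST_PHASE [] 0
  simp only [List.map_nil, List.nil_append] at hA
  rw [hA]
  have hB := pv_altB phases POST_PHASE 0
  simp only [List.drop_zero] at hB
  rw [hB]
  simp [List.zip_map']
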